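-- pv_equiv track=rewrite | github.com/puxina/Pux_Py | retorno.py | dado_valido
-- ===== SOURCE A (Python) =====
-- def dado_valido(d1, d2, jog_1, jog_2, pecas_posi, PC_NULA, PC_ESCURA, PC_CLARA):
--     """Verificação de quais dados são válidos para retornar a peça ao tabuleiro, conforme
--        três possíveis condições de retorno: casa vazia, captura do oponente e casa com
--        peças do jogador"""
--     d1_val = False
--     d2_val = False
--     casa_d1_cond = 0
--     casa_d2_cond = 0
--     for cont in range(6):
--         # Jogador 1 e Condição 1: Dado válido para retorno se a casa for vazia
--         if jog_1 and pecas_posi[cont][0] == PC_NULA: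
--             if d1 == (cont+1):
--                 d1_val = True
--                 casa_d1_cond = 1
--             if d2 == (cont+1):
--                 d2_val = True
--                 casa_d2_cond = 1
--         # Jogador 2 e Condição 1:: Dado válido para retorno se a casa for vazia
--         elif jog_2 and pecas_posi[23-cont][0] == PC_NULA:
--             if d1 == (cont+1):
--                 d1_val = True
--                 casa_d1_cond = 1
--             if d2 == (cont+1):
--                 d2_val = True
--                 casa_d2_cond = 1
--         # Jogador 1 e Condição 2: Dado válido para retorno se a casa somente tiver uma
--         # peça adversária, a qual será capturada
--         elif jog_1 and pecas_posi[cont][0] == PC_ESCURA and pecas_posi[cont][1] == PC_NULA: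
--             if d1 == (cont+1):
--                 d1_val = True
--                 casa_d1_cond = 2
--             if d2 == (cont+1):
--                 d2_val = True
--                 casa_d2_cond = 2
--         # Jogador 2 e Condição 2: Dado válido para retorno se a casa somente tiver uma
--         # peça adversária, a qual será capturada
--         elif jog_2 and pecas_posi[23-cont][0] == PC_CLARA and pecas_posi[23-cont][1] == PC_NULA:
--             if d1 == (cont+1):
--                 d1_val = True
--                 casa_d1_cond = 2
--             if d2 == (cont+1):
--                 d2_val = True
--                 casa_d2_cond = 2
--         # Jogador 1 e Condição 3: Dado válido para retorno em uma casa que contém peças suas (brancas)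
--         elif jog_1 and pecas_posi[cont][0] == PC_CLARA:
--             if d1 == (cont+1):
--                 d1_val = True
--                 casa_d1_cond = 3
--             if d2 == (cont+1):
--                 d2_val = True
--                 casa_d2_cond = 3
--         # Jogador 2 e Condição 3: Dado válido para retorno em uma casa que contém peças suas (pretas)
--         elif jog_2 and pecas_posi[23-cont][0] == PC_ESCURA:
--             if d1 == (cont+1):
--                 d1_val = True
--                 casa_d1_cond = 3
--             if d2 == (cont+1):
--                 d2_val = True
--                 casa_d2_cond = 3
--     return d1_val, d2_val, casa_d1_cond, casa_d2_cond
-- ===== SOURCE B (Python) =====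
-- def dado_valido(d1, d2, jog_1, jog_2, pecas_posi, PC_NULA, PC_ESCURA, PC_CLARA):
--     """Direct evaluation: each die maps to exactly one board case (d-1 for player 1,
--        23-(d-1) for player 2), so evaluate the condition chain only at that case
--        instead of scanning all six cases."""
--     def cond(p):
--         if jog_1 and pecas_posi[p][0] == PC_NULA:
--             return 1
--         if jog_2 and pecas_posi[23 - p][0] == PC_NULA:
--             return 1
--         if jog_1 and pecas_posi[p][0] == PC_ESCURA and pecas_posi[p][1] == PC_NULA:
--             return 2
--         if jog_2 and pecas_posi[23 - p][0] == PC_CLARA and pecas_posi[23 - p][1] == PC_NULA: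
--             return 2
--         if jog_1 and pecas_posi[p][0] == PC_CLARA:
--             return 3
--         if jog_2 and pecas_posi[23 - p][0] == PC_ESCURA:
--             return 3
--         return 0
--
--     def eval_die(d):
--         if not 1 <= d <= 6:
--             return False, 0
--         c = cond(d - 1)
--         return c != 0, c
--
--     d1_val, casa_d1_cond = eval_die(d1)
--     d2_val, casa_d2_cond = eval_die(d2)
--     return d1_val, d2_val, casa_d1_cond, casa_d2_cond
-- ===== Notes on version B (the rewrite author's own statement) =====
-- stated objective: simpler
-- what changed: Instead of scanning all six board cases and matching each die against cont+1 inside the loop, B evaluates the branch chain directly at the single case a die addresses (p = d-1, opponent side 23-p), via a cond(p)/eval_die(d) helper pair; the loop disappears.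
import Mathlib
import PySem

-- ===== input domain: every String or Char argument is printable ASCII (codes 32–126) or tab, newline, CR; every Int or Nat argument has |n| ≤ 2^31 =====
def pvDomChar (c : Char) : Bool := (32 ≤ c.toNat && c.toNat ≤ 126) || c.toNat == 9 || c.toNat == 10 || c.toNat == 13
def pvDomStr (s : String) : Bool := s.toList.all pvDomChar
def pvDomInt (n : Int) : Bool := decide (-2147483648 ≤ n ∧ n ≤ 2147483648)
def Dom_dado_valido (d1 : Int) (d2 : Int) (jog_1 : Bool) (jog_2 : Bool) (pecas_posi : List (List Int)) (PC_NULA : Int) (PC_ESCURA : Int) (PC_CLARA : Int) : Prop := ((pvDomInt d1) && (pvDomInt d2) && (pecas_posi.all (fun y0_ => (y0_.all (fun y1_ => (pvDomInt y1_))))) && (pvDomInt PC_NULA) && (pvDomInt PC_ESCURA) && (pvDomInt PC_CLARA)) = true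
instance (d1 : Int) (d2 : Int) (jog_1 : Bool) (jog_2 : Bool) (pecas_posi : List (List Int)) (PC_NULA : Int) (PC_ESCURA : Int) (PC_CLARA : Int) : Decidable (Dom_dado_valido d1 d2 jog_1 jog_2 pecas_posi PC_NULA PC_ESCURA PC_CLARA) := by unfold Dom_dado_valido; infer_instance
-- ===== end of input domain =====

-- B replaces A's six-case board scan by evaluating the same condition chain directly at the one
-- board case each die addresses (p = d-1, opponent side 23-p); same return value on well-formed boards.

-- Total indexing helper 'pecas_posi[i][j]' shared by both ports; on inputs admitted by
-- Pre_dado_valido every access is in range, so the defaults are never read there.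
def pvAt (pecas : List (List Int)) (i j : Int) : Int :=
  (PySem.List.pyGet? ((PySem.List.pyGet? pecas i).getD []) j).getD 0

-- ===== PORT A =====
-- loop body of A: the elif chain, each branch doing the two 'if d == cont+1' assignments
def dvStep (d1 d2 : Int) (jog_1 jog_2 : Bool) (pecas : List (List Int)) (NU ES CL : Int)
    (s : Bool × Bool × Int × Int) (cont : Int) : Bool × Bool × Int × Int :=
  let upd : Int → Bool × Bool × Int × Int := fun c =>
    ((if d1 == cont + 1 then true else s.1), (if d2 == cont + 1 then true else s.2.1),
     (if d1 == cont + 1 then c else s.2.2.1), (if d2 == cont + 1 then c else s.2.2.2))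
  if jog_1 && (pvAt pecas cont 0 == NU) then upd 1
  else if jog_2 && (pvAt pecas (23 - cont) 0 == NU) then upd 1
  else if jog_1 && (pvAt pecas cont 0 == ES) && (pvAt pecas cont 1 == NU) then upd 2
  else if jog_2 && (pvAt pecas (23 - cont) 0 == CL) && (pvAt pecas (23 - cont) 1 == NU) then upd 2
  else if jog_1 && (pvAt pecas cont 0 == CL) then upd 3
  else if jog_2 && (pvAt pecas (23 - cont) 0 == ES) then upd 3
  else s

def dado_valido (d1 : Int) (d2 : Int) (jog_1 : Bool) (jog_2 : Bool) (pecas_posi : List (List Int)) (PC_NULA : Int) (PC_ESCURA : Int) (PC_CLARA : Int) : Bool × Bool × Int × Int :=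
  List.foldl (dvStep d1 d2 jog_1 jog_2 pecas_posi PC_NULA PC_ESCURA PC_CLARA)
    (false, false, 0, 0) (PySem.List.pyRange 0 6 1)

-- ===== PORT B =====
-- Source B's cond(p): which of the three return conditions (1/2/3) holds at case p, 0 = none
def dvCond (jog_1 jog_2 : Bool) (pecas : List (List Int)) (NU ES CL : Int) (p : Int) : Int :=
  if jog_1 && (pvAt pecas p 0 == NU) then 1
  else if jog_2 && (pvAt pecas (23 - p) 0 == NU) then 1
  else if jog_1 && (pvAt pecas p 0 == ES) && (pvAt pecas p 1 == NU) then 2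
  else if jog_2 && (pvAt pecas (23 - p) 0 == CL) && (pvAt pecas (23 - p) 1 == NU) then 2
  else if jog_1 && (pvAt pecas p 0 == CL) then 3
  else if jog_2 && (pvAt pecas (23 - p) 0 == ES) then 3
  else 0

-- Source B's eval_die(d)
def dvEvalDie (jog_1 jog_2 : Bool) (pecas : List (List Int)) (NU ES CL : Int) (d : Int) : Bool × Int :=
  if ¬ (1 ≤ d ∧ d ≤ 6) then (false, 0)
  else
    let c := dvCond jog_1 jog_2 pecas NU ES CL (d - 1)
    (c != 0, c)

def dado_valido_alt (d1 : Int) (d2 : Int) (jog_1 : Bool) (jog_2 : Bool) (pecas_posi : List (List Int)) (PC_NULA : Int) (PC_ESCURA : Int) (PC_CLARA : Int) : Bool × Bool × Int × Int :=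
  let r1 := dvEvalDie jog_1 jog_2 pecas_posi PC_NULA PC_ESCURA PC_CLARA d1
  let r2 := dvEvalDie jog_1 jog_2 pecas_posi PC_NULA PC_ESCURA PC_CLARA d2
  (r1.1, r2.1, r1.2, r2.2)

-- ===== PRECONDITION & SPEC =====
-- Pre_ excludes inputs where Python A raises IndexError (a player flag set but the player's six
-- entry cases missing or too short); it is slightly narrower than the exact no-raise set: boards
-- that A happens to survive by short-circuit (e.g. 1-slot cases whose slot equals PC_NULA) are
-- also excluded, since 'each case has at least 2 slots' is the natural well-formed-board shape.
def Pre_dado_valido (d1 : Int) (d2 : Int) (jog_1 : Bool) (jog_2 : Bool) (pecas_posi : List (List Int)) (PC_NULA : Int) (PC_ESCURA : Int) (PC_CLARA : Int) : Prop :=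
  (jog_1 = true → 6 ≤ pecas_posi.length ∧ ∀ i < 6, 2 ≤ (pecas_posi.getD i []).length) ∧
  (jog_2 = true → 24 ≤ pecas_posi.length ∧ ∀ i < 24, 18 ≤ i → 2 ≤ (pecas_posi.getD i []).length)
instance (d1 : Int) (d2 : Int) (jog_1 : Bool) (jog_2 : Bool) (pecas_posi : List (List Int)) (PC_NULA : Int) (PC_ESCURA : Int) (PC_CLARA : Int) : Decidable (Pre_dado_valido d1 d2 jog_1 jog_2 pecas_posi PC_NULA PC_ESCURA PC_CLARA) := by unfold Pre_dado_valido; infer_instance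

def pvWitness_dado_valido : Int × Int × Bool × Bool × List (List Int) × Int × Int × Int :=
  (3, 5, true, false, [[1, 0], [0, 0], [2, 0], [1, 1], [0, 0], [2, 2]], 0, 1, 2)

def Spec_dado_valido (d1 : Int) (d2 : Int) (jog_1 : Bool) (jog_2 : Bool) (pecas_posi : List (List Int)) (PC_NULA : Int) (PC_ESCURA : Int) (PC_CLARA : Int) (out : Bool × Bool × Int × Int) : Prop := out = dado_valido_alt d1 d2 jog_1 jog_2 pecas_posi PC_NULA PC_ESCURA PC_CLARA
instance (d1 : Int) (d2 : Int) (jog_1 : Bool) (jog_2 : Bool) (pecas_posi : List (List Int)) (PC_NULA : Int) (PC_ESCURA : Int) (PC_CLARA : Int) (out : Bool × Bool × Int × Int) : Decidable (Spec_dado_valido d1 d2 jog_1 jog_2 pecas_posi PC_NULA PC_ESCURA PC_CLARA out) := by unfold Spec_dado_valido; infer_instance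

-- ===== CLAIM (what is proved, stated in full; the proofs are below) =====
def Claim_equal_dado_valido : Prop := ∀ (d1 : Int) (d2 : Int) (jog_1 : Bool) (jog_2 : Bool) (pecas_posi : List (List Int)) (PC_NULA : Int) (PC_ESCURA : Int) (PC_CLARA : Int), Dom_dado_valido d1 d2 jog_1 jog_2 pecas_posi PC_NULA PC_ESCURA PC_CLARA → Pre_dado_valido d1 d2 jog_1 jog_2 pecas_posi PC_NULA PC_ESCURA PC_CLARA → Spec_dado_valido d1 d2 jog_1 jog_2 pecas_posi PC_NULA PC_ESCURA PC_CLARA (dado_valido d1 d2 jog_1 jog_2 pecas_posi PC_NULA PC_ESCURA PC_CLARA)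

-- ===== LEMMAS AND PROOFS =====

-- A's loop body, phrased through B's condition chain: the branch taken is the one dvCond names.
theorem dvStep_eq_cond (d1 d2 : Int) (jog_1 jog_2 : Bool) (pecas : List (List Int)) (NU ES CL : Int)
    (s : Bool × Bool × Int × Int) (cont : Int) :
    dvStep d1 d2 jog_1 jog_2 pecas NU ES CL s cont =
      (if dvCond jog_1 jog_2 pecas NU ES CL cont = 0 then s else
        ((if d1 == cont + 1 then true else s.1), (if d2 == cont + 1 then true else s.2.1),
         (if d1 == cont + 1 then dvCond jog_1 jog_2 pecas NU ES CL cont else s.2.2.1),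
         (if d2 == cont + 1 then dvCond jog_1 jog_2 pecas NU ES CL cont else s.2.2.2))) := by
  simp only [dvStep, dvCond]
  split_ifs <;> first | rfl | simp_all

-- the per-die accumulator the loop maintains for one die (its valid flag and its condition number)
def dvUpd (jog_1 jog_2 : Bool) (pecas : List (List Int)) (NU ES CL d : Int)
    (vc : Bool × Int) (cont : Int) : Bool × Int :=
  if dvCond jog_1 jog_2 pecas NU ES CL cont = 0 then vc
  else if d = cont + 1 then (true, dvCond jog_1 jog_2 pecas NU ES CL cont) else vc

-- A's four-component loop splits into two independent per-die folds
theorem foldl_dvStep_split (d1 d2 : Int) (jog_1 jog_2 : Bool) (pecas : List (List Int))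
    (NU ES CL : Int) (l : List Int) (s : Bool × Bool × Int × Int) :
    List.foldl (dvStep d1 d2 jog_1 jog_2 pecas NU ES CL) s l =
      ((List.foldl (dvUpd jog_1 jog_2 pecas NU ES CL d1) (s.1, s.2.2.1) l).1,
       (List.foldl (dvUpd jog_1 jog_2 pecas NU ES CL d2) (s.2.1, s.2.2.2) l).1,
       (List.foldl (dvUpd jog_1 jog_2 pecas NU ES CL d1) (s.1, s.2.2.1) l).2,
       (List.foldl (dvUpd jog_1 jog_2 pecas NU ES CL d2) (s.2.1, s.2.2.2) l).2) := by
  induction l generalizing s with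
  | nil => simp
  | cons h t ih =>
    by_cases hc : dvCond jog_1 jog_2 pecas NU ES CL h = 0
    · simp [List.foldl_cons, dvStep_eq_cond, dvUpd, hc, ih]
    · rw [List.foldl_cons, dvStep_eq_cond, if_neg hc, ih]
      simp only [List.foldl_cons, dvUpd, if_neg hc]
      by_cases h1 : d1 = h + 1 <;> by_cases h2 : d2 = h + 1 <;> simp [h1, h2]

-- folding the per-die accumulator over the six cases is Source B's eval_die
theorem foldl_dvUpd_range (jog_1 jog_2 : Bool) (pecas : List (List Int)) (NU ES CL d : Int) :
    List.foldl (dvUpd jog_1 jog_2 pecas NU ES CL d) (false, 0) [0, 1, 2, 3, 4, 5] =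
      dvEvalDie jog_1 jog_2 pecas NU ES CL d := by
  by_cases e1 : d = 1
  · subst e1
    simp only [List.foldl, dvUpd, dvEvalDie]
    norm_num
    by_cases hc : dvCond jog_1 jog_2 pecas NU ES CL 0 = 0 <;> simp [hc]
  · by_cases e2 : d = 2
    · subst e2
      simp only [List.foldl, dvUpd, dvEvalDie]
      norm_num
      by_cases hc : dvCond jog_1 jog_2 pecas NU ES CL 1 = 0 <;> simp [hc]
    · by_cases e3 : d = 3
      · subst e3
        simp only [List.foldl, dvUpd, dvEvalDie]
        norm_num
        by_cases hc : dvCond jog_1 jog_2 pecas NU ES CL 2 = 0 <;> simp [hc]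
      · by_cases e4 : d = 4
        · subst e4
          simp only [List.foldl, dvUpd, dvEvalDie]
          norm_num
          by_cases hc : dvCond jog_1 jog_2 pecas NU ES CL 3 = 0 <;> simp [hc]
        · by_cases e5 : d = 5
          · subst e5
            simp only [List.foldl, dvUpd, dvEvalDie]
            norm_num
            by_cases hc : dvCond jog_1 jog_2 pecas NU ES CL 4 = 0 <;> simp [hc]
          · by_cases e6 : d = 6
            · subst e6
              simp only [List.foldl, dvUpd, dvEvalDie]
              norm_num
              by_cases hc : dvCond jog_1 jog_2 pecas NU ES CL 5 = 0 <;> simp [hc]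
            · have hout : ¬ (1 ≤ d ∧ d ≤ 6) := by omega
              simp only [List.foldl, dvUpd, dvEvalDie, if_pos hout]
              simp [e1, e2, e3, e4, e5, e6]

theorem pyRange06 : PySem.List.pyRange 0 6 1 = [0, 1, 2, 3, 4, 5] := by decide

-- ===== VERDICT (by name: the statement is the Claim_ definition above) =====
theorem dado_valido_spec : Claim_equal_dado_valido := by
  intro d1 d2 jog_1 jog_2 pecas_posi NU ES CL _ _
  unfold Spec_dado_valido dado_valido dado_valido_alt
  rw [pyRange06, foldl_dvStep_split]
  simp only [foldl_dvUpd_range]
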